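-- pv_equiv track=rewrite | github.com/JamilProg/crosslingual_bert_annotation_projection | src/silver_standard_factory/__init__.py | remove_heading_punctations
-- ===== SOURCE A (Python) =====
-- import string
--
-- def remove_heading_punctations(txt):
--     count = 0
--     for char in txt:
--         if char in string.punctuation:
--             count += 1
--         else:
--             break
--     txt = txt.lstrip(string.punctuation)
--     return txt, count
-- ===== SOURCE B (Python) =====
-- import string
--
-- def remove_heading_punctations(txt):
--     stripped = txt.lstrip(string.punctuation)
--     return stripped, len(txt) - len(stripped)
-- ===== Notes on version B (the rewrite author's own statement) =====
-- stated objective: simpler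
-- what changed: Drops the explicit char-by-char counting loop; B computes the stripped string once with lstrip and derives the count as the length difference.
import Mathlib
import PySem

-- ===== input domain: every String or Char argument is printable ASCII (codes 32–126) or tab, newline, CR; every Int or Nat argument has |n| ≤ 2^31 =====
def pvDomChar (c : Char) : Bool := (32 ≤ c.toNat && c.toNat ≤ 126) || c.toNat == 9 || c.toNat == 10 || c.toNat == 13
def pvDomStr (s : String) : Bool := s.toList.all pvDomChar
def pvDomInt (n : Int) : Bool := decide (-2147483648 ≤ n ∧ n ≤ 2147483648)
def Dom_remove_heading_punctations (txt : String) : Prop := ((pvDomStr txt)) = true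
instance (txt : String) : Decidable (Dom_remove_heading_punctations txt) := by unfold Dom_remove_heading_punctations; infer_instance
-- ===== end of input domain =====

-- B replaces A's explicit counting loop by computing the stripped string first and
-- deriving the count as the length difference (objective: simpler).

-- string.punctuation, as a list of chars
def pyPunctuation : List Char := "!\"#$%&'()*+,-./:;<=>?@[\\]^_`{|}~".toList

-- s.lstrip(chars): drop the leading run of characters contained in chars
-- (exact hand port of Python's str.lstrip with a chars argument).
def pyLstripChars (s : List Char) (chars : List Char) : List Char :=
  s.dropWhile (fun c => chars.contains c)

-- ===== PORT A =====
-- the for-loop with break: count leading punctuation, stop at the first other char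
def pvCountLoop (cs : List Char) (count : Int) : Int :=
  match cs with
  | [] => count
  | c :: rest => if pyPunctuation.contains c then pvCountLoop rest (count + 1) else count

def remove_heading_punctations (txt : String) : String × Int :=
  let count := pvCountLoop txt.toList 0
  let txt' := String.ofList (pyLstripChars txt.toList pyPunctuation)
  (txt', count)

-- ===== PORT B =====
def remove_heading_punctations_alt (txt : String) : String × Int :=
  let stripped := String.ofList (pyLstripChars txt.toList pyPunctuation)
  (stripped, (PySem.Str.len txt : Int) - (PySem.Chars.len (pyLstripChars txt.toList pyPunctuation) : Int))

-- ===== PRECONDITION & SPEC =====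
def Spec_remove_heading_punctations (txt : String) (out : String × Int) : Prop := out = remove_heading_punctations_alt txt
instance (txt : String) (out : String × Int) : Decidable (Spec_remove_heading_punctations txt out) := by unfold Spec_remove_heading_punctations; infer_instance

-- ===== CLAIM (what is proved, stated in full; the proofs are below) =====
def Claim_equal_remove_heading_punctations : Prop := ∀ (txt : String), Dom_remove_heading_punctations txt → Spec_remove_heading_punctations txt (remove_heading_punctations txt)

-- ===== LEMMAS AND PROOFS =====

-- A's loop count = length of the input minus length of the stripped remainder
theorem pvCountLoop_eq (cs : List Char) (count : Int) :
    pvCountLoop cs count = count + ((cs.length : Int) - ((pyLstripChars cs pyPunctuation).length : Int)) := by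
  induction cs generalizing count with
  | nil => simp [pvCountLoop, pyLstripChars]
  | cons c rest ih =>
    simp only [pvCountLoop, pyLstripChars, List.dropWhile]
    by_cases h : pyPunctuation.contains c
    · simp only [h, if_true]
      rw [ih]
      simp only [pyLstripChars, List.length_cons]
      push_cast
      ring
    · simp only [h, if_false, Bool.false_eq_true]
      simp

-- ===== VERDICT (by name: the statement is the Claim_ definition above) =====
theorem remove_heading_punctations_spec : Claim_equal_remove_heading_punctations := by
  intro txt _
  unfold Spec_remove_heading_punctations remove_heading_punctations remove_heading_punctations_alt
  simp only [PySem.Str.len, PySem.Chars.len]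
  rw [pvCountLoop_eq]
  simp
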